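-- pv_equiv track=rewrite | github.com/intel-ctrlsys/actsys | datastore/filestore.py | _device_find
-- ===== SOURCE A (Python) =====
-- def _device_find(device_name, devices):
--     """
--     Given a device name and a list of devices, locates the device in that list.
--     :param device_name:
--     :param devices:
--     :return: The index and device (index, device) or (None, None) if they are not found.
--     """
--     # Check for a matching device_id
--     for index, device in enumerate(devices):
--         if device.get('device_id') == device_name:
--             return index, device
--     # Check for hostname
--     for index, device in enumerate(devices):
--         if device.get('hostname') == device_name:
--             return index, device
--     # Check for ip
--     for index, device in enumerate(devices):
--         if device.get('ip_address') == device_name: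
--             return index, device
--
--     return None, None
-- ===== SOURCE B (Python) =====
-- def _device_find(device_name, devices):
--     """Single pass: record the first match per key category, resolve priority after the scan."""
--     id_match = host_match = ip_match = None
--     for index, device in enumerate(devices):
--         if id_match is None and device.get('device_id') == device_name:
--             id_match = (index, device)
--         if host_match is None and device.get('hostname') == device_name:
--             host_match = (index, device)
--         if ip_match is None and device.get('ip_address') == device_name:
--             ip_match = (index, device)
--     for m in (id_match, host_match, ip_match):
--         if m is not None:
--             return m
--     return None, None
-- ===== Notes on version B (the rewrite author's own statement) =====
-- stated objective: alternative
-- what changed: Replaces A's three sequential early-return scans of the device list with a single pass that records the first match per key category and resolves the id>hostname>ip priority after the scan.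
import Mathlib
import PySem

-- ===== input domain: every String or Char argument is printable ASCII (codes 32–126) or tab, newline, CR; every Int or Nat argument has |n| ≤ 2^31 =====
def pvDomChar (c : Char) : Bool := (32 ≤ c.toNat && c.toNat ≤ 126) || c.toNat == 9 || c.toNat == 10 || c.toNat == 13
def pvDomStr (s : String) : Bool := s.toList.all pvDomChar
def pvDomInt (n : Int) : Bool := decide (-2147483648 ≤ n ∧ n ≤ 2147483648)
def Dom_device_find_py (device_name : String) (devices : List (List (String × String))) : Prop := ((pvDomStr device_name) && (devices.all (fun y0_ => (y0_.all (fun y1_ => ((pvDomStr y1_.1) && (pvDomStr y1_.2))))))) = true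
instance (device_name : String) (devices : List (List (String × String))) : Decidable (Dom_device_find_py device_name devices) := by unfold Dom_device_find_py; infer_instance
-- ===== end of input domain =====

-- B replaces A's three sequential scans with one pass recording the first match
-- per key category (id > hostname > ip resolved after the scan); objective: alternative decomposition.
-- ===== PORT A =====
-- dict.get(k): first-match lookup on the association list (exact for Python dicts, which have unique keys)
def pvDictGet (d : List (String × String)) (k : String) : Option String :=
  match d with
  | [] => none
  | (k', v) :: rest => if k' == k then some v else pvDictGet rest k

-- one 'for index, device in enumerate(devices): if device.get(key) == device_name: return index, device' loop
def pvScanKey (device_name key : String) : List (List (String × String)) → Int → Option (Int × List (String × String))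
  | [], _ => none
  | d :: ds, i => if pvDictGet d key == some device_name then some (i, d) else pvScanKey device_name key ds (i + 1)

def device_find_py (device_name : String) (devices : List (List (String × String))) : Option Int × (Option (List (String × String))) :=
  match pvScanKey device_name "device_id" devices 0 with
  | some (i, d) => (some i, some d)
  | none =>
    match pvScanKey device_name "hostname" devices 0 with
    | some (i, d) => (some i, some d)
    | none =>
      match pvScanKey device_name "ip_address" devices 0 with
      | some (i, d) => (some i, some d)
      | none => (none, none)

-- ===== PORT B =====
-- the single pass: three slots, each set only the first time its key matches
def pvAltLoop (device_name : String) : List (List (String × String)) → Int →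
    Option (Int × List (String × String)) → Option (Int × List (String × String)) → Option (Int × List (String × String)) →
    Option (Int × List (String × String)) × Option (Int × List (String × String)) × Option (Int × List (String × String))
  | [], _, idm, hm, ipm => (idm, hm, ipm)
  | d :: ds, i, idm, hm, ipm =>
    let idm' := if idm.isNone && (pvDictGet d "device_id" == some device_name) then some (i, d) else idm
    let hm'  := if hm.isNone && (pvDictGet d "hostname" == some device_name) then some (i, d) else hm
    let ipm' := if ipm.isNone && (pvDictGet d "ip_address" == some device_name) then some (i, d) else ipm
    pvAltLoop device_name ds (i + 1) idm' hm' ipm'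

def device_find_py_alt (device_name : String) (devices : List (List (String × String))) : Option Int × (Option (List (String × String))) :=
  match pvAltLoop device_name devices 0 none none none with
  | (idm, hm, ipm) =>
    match (idm.or hm).or ipm with
    | some (i, d) => (some i, some d)
    | none => (none, none)

-- ===== PRECONDITION & SPEC =====
def Spec_device_find_py (device_name : String) (devices : List (List (String × String))) (out : Option Int × (Option (List (String × String)))) : Prop := out = device_find_py_alt device_name devices
instance (device_name : String) (devices : List (List (String × String))) (out : Option Int × (Option (List (String × String)))) : Decidable (Spec_device_find_py device_name devices out) := by unfold Spec_device_find_py; infer_instance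

-- ===== CLAIM (what is proved, stated in full; the proofs are below) =====
def Claim_equal_device_find_py : Prop := ∀ (device_name : String) (devices : List (List (String × String))), Dom_device_find_py device_name devices → Spec_device_find_py device_name devices (device_find_py device_name devices)

-- ===== LEMMAS AND PROOFS =====
-- one update step of a slot, absorbed into the first-match scan of its key
theorem pvSlot_step (device_name key : String) (d : List (String × String))
    (ds : List (List (String × String))) (i : Int) (o : Option (Int × List (String × String))) :
    (if o.isNone && (pvDictGet d key == some device_name) then some (i, d) else o).or
      (pvScanKey device_name key ds (i + 1)) =
    o.or (pvScanKey device_name key (d :: ds) i) := by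
  cases o with
  | none =>
    simp only [Option.isNone_none, Bool.true_and, pvScanKey]
    by_cases h : (pvDictGet d key == some device_name) = true <;> simp [h]
  | some v => simp

theorem pvAltLoop_eq (device_name : String) (ds : List (List (String × String))) :
    ∀ (i : Int) idm hm ipm, pvAltLoop device_name ds i idm hm ipm =
      (idm.or (pvScanKey device_name "device_id" ds i),
       hm.or (pvScanKey device_name "hostname" ds i),
       ipm.or (pvScanKey device_name "ip_address" ds i)) := by
  induction ds with
  | nil => intro i idm hm ipm; simp [pvAltLoop, pvScanKey]
  | cons d ds ih =>
    intro i idm hm ipm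
    simp only [pvAltLoop, ih, pvSlot_step]

theorem device_find_py_spec : Claim_equal_device_find_py := by
  intro device_name devices _
  unfold Spec_device_find_py device_find_py device_find_py_alt
  rw [pvAltLoop_eq]
  simp only [Option.or]
  cases pvScanKey device_name "device_id" devices 0 <;>
    cases pvScanKey device_name "hostname" devices 0 <;>
    cases pvScanKey device_name "ip_address" devices 0 <;> rfl
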